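-- pv_equiv track=rewrite | github.com/VoxDroid/python-1000-snippets | python-1000-snippets/0481-Real-Time-Rendering/SAMPLES/sample2.py | render_frame
-- ===== SOURCE A (Python) =====
-- def render_frame(width: int, height: int, frame: int) -> str:
--     # Simple animation: a dot moving left-to-right and bouncing.
--     pos = frame % (width * 2 - 2)
--     if pos >= width:
--         pos = (width * 2 - 2) - pos
--     buffer = []
--     for y in range(height):
--         row = []
--         for x in range(width):
--             row.append("O" if x == pos and y == height // 2 else ".")
--         buffer.append("".join(row))
--     return "\n".join(buffer)
-- ===== SOURCE B (Python) =====
-- def render_frame(width: int, height: int, frame: int) -> str: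
--     # Bouncing-dot frame: build whole rows at once instead of per-character loops.
--     span = width * 2 - 2
--     pos = frame % span
--     if pos >= width:
--         pos = span - pos
--     rows = ["." * width for _ in range(height)]
--     if height > 0 and 0 <= pos < width:
--         rows[height // 2] = "." * pos + "O" + "." * (width - pos - 1)
--     return "\n".join(rows)
-- ===== Notes on version B (the rewrite author's own statement) =====
-- stated objective: simpler
-- what changed: Replaces the nested per-character loops with whole-row construction: every row is '.'*width, and the single middle row is built by string repetition and one splice at the dot position, then rows are joined.
import Mathlib
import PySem

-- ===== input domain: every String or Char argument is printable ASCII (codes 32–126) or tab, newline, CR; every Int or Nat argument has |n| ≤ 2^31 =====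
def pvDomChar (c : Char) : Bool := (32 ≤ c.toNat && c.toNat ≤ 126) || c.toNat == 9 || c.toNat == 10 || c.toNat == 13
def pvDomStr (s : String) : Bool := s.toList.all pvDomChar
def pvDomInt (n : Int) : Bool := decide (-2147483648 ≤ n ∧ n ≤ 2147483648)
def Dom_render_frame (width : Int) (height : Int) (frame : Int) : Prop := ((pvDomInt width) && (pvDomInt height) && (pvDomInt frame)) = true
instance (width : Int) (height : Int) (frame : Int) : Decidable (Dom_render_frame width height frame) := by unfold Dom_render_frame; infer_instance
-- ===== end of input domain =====

-- B builds whole rows at once ('.'*width, and one spliced middle row) instead of A's per-character inner loop: simpler.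

-- ===== PORT A =====
def render_frame (width : Int) (height : Int) (frame : Int) : String :=
  let pos0 : Int := PySem.Int.mod frame (width * 2 - 2)
  let pos : Int := if pos0 ≥ width then (width * 2 - 2) - pos0 else pos0
  let buffer : List String :=
    (PySem.List.pyRange 0 height 1).foldl (fun buf y =>
      let row : List String :=
        (PySem.List.pyRange 0 width 1).foldl (fun row x =>
          row ++ [if x = pos ∧ y = PySem.Int.floordiv height 2 then "O" else "."]) []
      buf ++ [PySem.Str.join "" row]) []
  PySem.Str.join "\n" buffer

-- ===== PORT B =====
def render_frame_alt (width : Int) (height : Int) (frame : Int) : String :=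
  let span : Int := width * 2 - 2
  let pos0 : Int := PySem.Int.mod frame span
  let pos : Int := if pos0 ≥ width then span - pos0 else pos0
  -- "." * n is repetition of the one-char list: PySem.List.pyRepeat ['.'] n (exact; n ≤ 0 gives "")
  let rows : List String :=
    (PySem.List.pyRange 0 height 1).map (fun _ => String.ofList (PySem.List.pyRepeat ['.'] width))
  let rows : List String :=
    if 0 < height ∧ 0 ≤ pos ∧ pos < width then
      -- rows[height // 2] = … ; under the guard the index is nonnegative and < len(rows), so List.set is exact
      rows.set (PySem.Int.floordiv height 2).toNat
        (String.ofList (PySem.List.pyRepeat ['.'] pos ++ ['O'] ++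
          PySem.List.pyRepeat ['.'] (width - pos - 1)))
    else rows
  PySem.Str.join "\n" rows

-- ===== PRECONDITION & SPEC =====
-- Pre_ excludes width = 1, where the Python A raises ZeroDivisionError (frame % (width*2-2) with a zero divisor).
def Pre_render_frame (width : Int) (height : Int) (frame : Int) : Prop := width ≠ 1
instance (width : Int) (height : Int) (frame : Int) : Decidable (Pre_render_frame width height frame) := by unfold Pre_render_frame; infer_instance
def pvWitness_render_frame : Int × Int × Int := (5, 3, 7)

def Spec_render_frame (width : Int) (height : Int) (frame : Int) (out : String) : Prop := out = render_frame_alt width height frame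
instance (width : Int) (height : Int) (frame : Int) (out : String) : Decidable (Spec_render_frame width height frame out) := by unfold Spec_render_frame; infer_instance

-- ===== CLAIM (what is proved, stated in full; the proofs are below) =====
def Claim_equal_render_frame : Prop := ∀ (width : Int) (height : Int) (frame : Int), Dom_render_frame width height frame → Pre_render_frame width height frame → Spec_render_frame width height frame (render_frame width height frame)

-- ===== LEMMAS AND PROOFS =====

-- the outer 'append a row' foldl is a map
theorem pv_foldl_append {α β : Type} (g : α → β) (l : List α) (init : List β) :
    l.foldl (fun buf y => buf ++ [g y]) init = init ++ l.map g := by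
  induction l generalizing init with
  | nil => simp
  | cons a l ih => simp [List.foldl_cons, ih, List.append_assoc]

-- joining with "" is flattening
theorem pv_join_nil_flatten (xs : List (List Char)) :
    PySem.Chars.join [] xs = xs.flatten := by
  induction xs with
  | nil => simp [PySem.Chars.join_nil]
  | cons p rest ih =>
    cases rest with
    | nil => simp [PySem.Chars.join_singleton]
    | cons q r => rw [PySem.Chars.join_cons_cons]; simp_all

-- A's inner loop, as a string of its characters
theorem pv_rowA_toList (w pos mid y : Int) :
    (PySem.Str.join "" ((PySem.List.pyRange 0 w 1).foldl (fun row x =>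
        row ++ [if x = pos ∧ y = mid then "O" else "."]) [])).toList
    = ((PySem.List.pyRange 0 w 1).map (fun x =>
        if x = pos ∧ y = mid then 'O' else '.')) := by
  rw [pv_foldl_append (fun x => if x = pos ∧ y = mid then "O" else ".") _ []]
  rw [PySem.Str.toList_join]
  simp only [List.nil_append, List.map_map]
  have : (String.toList ∘ fun x => if x = pos ∧ y = mid then "O" else ".")
       = fun x => [if x = pos ∧ y = mid then 'O' else '.'] := by
    funext x; by_cases h : x = pos ∧ y = mid <;> simp [h]
  rw [show ("" : String).toList = [] from rfl, this, pv_join_nil_flatten]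
  induction (PySem.List.pyRange 0 w 1) with
  | nil => simp
  | cons a l ih => simp [ih]

-- the middle row, with the dot spliced in at pos
theorem pv_row_mid (w pos : Int) (h0 : 0 ≤ pos) (h1 : pos < w) :
    ((PySem.List.pyRange 0 w 1).map (fun x => if x = pos then 'O' else '.'))
    = List.replicate pos.toNat '.' ++ ['O'] ++ List.replicate (w - pos - 1).toNat '.' := by
  rw [PySem.List.pyRange_one_append 0 pos w h0 (le_of_lt h1),
      PySem.List.pyRange_one_cons h1]
  simp only [List.map_append, List.map_cons]
  have hleft : ∀ x ∈ PySem.List.pyRange 0 pos 1,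
      (if x = pos then 'O' else '.') = '.' := by
    intro x hx
    rw [PySem.List.mem_pyRange_one] at hx
    have : x ≠ pos := by omega
    simp [this]
  have hright : ∀ x ∈ PySem.List.pyRange (pos + 1) w 1,
      (if x = pos then 'O' else '.') = '.' := by
    intro x hx
    rw [PySem.List.mem_pyRange_one] at hx
    have : x ≠ pos := by omega
    simp [this]
  rw [List.map_congr_left hleft, List.map_congr_left hright,
      List.map_const', List.map_const', PySem.List.length_pyRange_one,
      PySem.List.length_pyRange_one]
  simp only [Int.sub_zero]
  have : w - (pos + 1) = w - pos - 1 := by ring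
  rw [this]
  simp

-- main list-level equality: A's buffer equals B's rows (for any admissible pos)
theorem pv_buffer_eq (w h pos : Int) (hpos : w ≤ 0 ∨ (0 ≤ pos ∧ pos < w)) :
    ((PySem.List.pyRange 0 h 1).foldl (fun buf y =>
      buf ++ [PySem.Str.join "" ((PySem.List.pyRange 0 w 1).foldl (fun row x =>
          row ++ [if x = pos ∧ y = PySem.Int.floordiv h 2 then "O" else "."]) [])]) [])
    = (if 0 < h ∧ 0 ≤ pos ∧ pos < w then
        ((PySem.List.pyRange 0 h 1).map (fun _ => String.ofList (PySem.List.pyRepeat ['.'] w))).set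
          (PySem.Int.floordiv h 2).toNat
          (String.ofList (PySem.List.pyRepeat ['.'] pos ++ ['O'] ++
            PySem.List.pyRepeat ['.'] (w - pos - 1)))
      else (PySem.List.pyRange 0 h 1).map (fun _ => String.ofList (PySem.List.pyRepeat ['.'] w))) := by
  rw [pv_foldl_append, List.nil_append, PySem.List.pyRepeat_singleton,
      List.map_const', PySem.List.length_pyRange_one, Int.sub_zero]
  rcases hpos with hw | hpos
  · -- width ≤ 0: every row is "", and the guard is false
    have hguard : ¬ (0 < h ∧ 0 ≤ pos ∧ pos < w) := by omega
    rw [if_neg hguard]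
    have hrow : ∀ y ∈ PySem.List.pyRange 0 h 1,
        PySem.Str.join "" ((PySem.List.pyRange 0 w 1).foldl (fun row x =>
          row ++ [if x = pos ∧ y = PySem.Int.floordiv h 2 then "O" else "."]) [])
        = String.ofList (List.replicate w.toNat '.') := by
      intro y _
      apply String.toList_inj.mp
      rw [pv_rowA_toList, String.toList_ofList]
      have : PySem.List.pyRange 0 w 1 = [] := PySem.List.pyRange_one_eq_nil (by omega)
      rw [this]
      have : w.toNat = 0 := by omega
      simp [this]
    rw [List.map_congr_left hrow, List.map_const', PySem.List.length_pyRange_one]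
    simp
  · -- 0 ≤ pos < width
    by_cases hh : 0 < h
    · rw [if_pos ⟨hh, hpos⟩]
      have hmid : 0 ≤ PySem.Int.floordiv h 2 ∧ PySem.Int.floordiv h 2 < h := by
        rw [PySem.Int.floordiv_eq_ediv_of_pos (by omega : (0:Int) < 2)]
        omega
      apply List.ext_getElem
      · simp [PySem.List.length_pyRange_one]
      · intro k hk1 hk2
        simp only [List.getElem_map]
        rw [PySem.List.getElem_pyRange_one, List.getElem_set]
        have hklen : k < h.toNat := by
          simpa [PySem.List.length_pyRange_one] using hk1
        rw [List.getElem_replicate]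
        apply String.toList_inj.mp
        rw [pv_rowA_toList]
        by_cases hkm : (PySem.Int.floordiv h 2).toNat = k
        · have hy : (0 : Int) + k = PySem.Int.floordiv h 2 := by omega
          have hfun : (fun x => if x = pos ∧ (0 : Int) + k = PySem.Int.floordiv h 2 then 'O' else '.')
              = (fun x : Int => if x = pos then 'O' else '.') := by
            funext x
            by_cases hx : x = pos
            · rw [if_pos ⟨hx, hy⟩, if_pos hx]
            · rw [if_neg (fun hc => hx hc.1), if_neg hx]
          rw [if_pos hkm, String.toList_ofList, PySem.List.pyRepeat_singleton,
              PySem.List.pyRepeat_singleton, hfun]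
          exact pv_row_mid w pos hpos.1 hpos.2
        · have hy : ¬ ((0 : Int) + k = PySem.Int.floordiv h 2) := by omega
          have hfun : (fun x => if x = pos ∧ (0 : Int) + k = PySem.Int.floordiv h 2 then 'O' else '.')
              = (fun _ : Int => '.') := by
            funext x
            rw [if_neg (fun hc => hy hc.2)]
          rw [if_neg hkm, String.toList_ofList, hfun, List.map_const',
              PySem.List.length_pyRange_one]
          simp
    · have hguard : ¬ (0 < h ∧ 0 ≤ pos ∧ pos < w) := by omega
      rw [if_neg hguard]
      have : PySem.List.pyRange 0 h 1 = [] := PySem.List.pyRange_one_eq_nil (by omega)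
      rw [this]
      have : h.toNat = 0 := by omega
      simp [this]

-- ===== VERDICT (by name: the statement is the Claim_ definition above) =====
theorem render_frame_spec : Claim_equal_render_frame := by
  intro w h f _ hpre
  unfold Spec_render_frame render_frame render_frame_alt
  simp only []
  set pos0 := PySem.Int.mod f (w * 2 - 2) with hpos0
  set pos : Int := if pos0 ≥ w then (w * 2 - 2) - pos0 else pos0 with hpos
  have hadm : w ≤ 0 ∨ (0 ≤ pos ∧ pos < w) := by
    by_cases hspan : 0 < w * 2 - 2
    · right
      have hnn := PySem.Int.mod_nonneg f hspan
      have hlt := PySem.Int.mod_lt f hspan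
      rw [← hpos0] at hnn hlt
      rw [hpos]
      split_ifs <;> omega
    · left
      have : w ≠ 1 := hpre
      omega
  rw [pv_buffer_eq w h pos hadm]
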